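-- pv_equiv track=rewrite | github.com/MattHewDNx/Kattis | oddmanout.py | find_odd_man_out
-- ===== SOURCE A (Python) =====
-- def find_odd_man_out(test_case, guests):
--     guest_count = {}
--
--     for guest in guests:
--         if guest in guest_count:
--             guest_count[guest] += 1
--         else:
--             guest_count[guest] = 1
--
--     for guest, count in guest_count.items():
--         if count == 1:
--             return f"Case #{test_case}: {guest}"
-- ===== SOURCE B (Python) =====
-- def find_odd_man_out(test_case, guests):
--     # Candidate-elimination, single pass, no counting: a guest seen for the
--     # first time becomes a candidate; seen again, it is eliminated for good.
--     candidates = []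
--     dupes = set()
--     for g in guests:
--         if g in dupes:
--             continue
--         if g in candidates:
--             candidates.remove(g)
--             dupes.add(g)
--         else:
--             candidates.append(g)
--     if candidates:
--         return f"Case #{test_case}: {candidates[0]}"
-- ===== Notes on version B (the rewrite author's own statement) =====
-- stated objective: alternative
-- what changed: Replaces A's frequency-counting dictionary plus a second pass over its items with a single candidate-elimination pass: first sight of a guest appends it to an ordered candidate list, second sight removes it and bans it via a dupes set, and the answer is the first surviving candidate.
import Mathlib
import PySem

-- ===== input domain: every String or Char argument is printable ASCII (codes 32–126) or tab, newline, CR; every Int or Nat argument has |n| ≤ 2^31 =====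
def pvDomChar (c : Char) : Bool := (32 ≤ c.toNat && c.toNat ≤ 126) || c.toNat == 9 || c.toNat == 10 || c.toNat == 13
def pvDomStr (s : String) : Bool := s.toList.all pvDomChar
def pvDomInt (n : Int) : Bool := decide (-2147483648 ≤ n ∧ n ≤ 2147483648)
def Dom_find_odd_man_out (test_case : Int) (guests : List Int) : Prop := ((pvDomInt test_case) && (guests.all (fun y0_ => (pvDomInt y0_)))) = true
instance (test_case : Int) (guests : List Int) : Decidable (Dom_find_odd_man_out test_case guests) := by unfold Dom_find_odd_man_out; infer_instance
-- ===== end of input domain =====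

-- B replaces A's frequency dictionary + second items pass with a single candidate-elimination pass (alternative algorithm; not faster).

-- ===== PORT A =====
-- f"Case #{test_case}: {guest}"  (shared by both Pythons verbatim)
def fmtCase (test_case guest : Int) : String :=
  "Case #" ++ PySem.Int.toStr test_case ++ ": " ++ PySem.Int.toStr guest

-- A's second loop: 'for guest, count in guest_count.items(): if count == 1: return …'
def findOddScan (test_case : Int) : List (Int × Int) → Option String
  | [] => none
  | (guest, count) :: rest =>
    if count == 1 then some (fmtCase test_case guest) else findOddScan test_case rest

def find_odd_man_out (test_case : Int) (guests : List Int) : Option String :=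
  let guest_count := guests.foldl
    (fun d guest =>
      if d.contains guest then d.insert guest (d.getD guest 0 + 1)
      else d.insert guest 1)
    (PySem.Dict.empty : PySem.Dict Int Int)
  findOddScan test_case guest_count.items

-- ===== PORT B =====
-- B's loop: first sight appends g to candidates; second sight removes it (Python
-- 'candidates.remove(g)' = PySem.List.remove?; guarded by 'g in candidates', so the
-- getD default is unreachable) and bans it in dupes; later sights are skipped.
def elimLoop (cand : List Int) (dupes : PySem.Set Int) : List Int → List Int
  | [] => cand
  | g :: rest =>
    if PySem.Set.contains dupes g then elimLoop cand dupes rest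
    else if cand.contains g then
      elimLoop ((PySem.List.remove? cand g).getD cand) (PySem.Set.add dupes g) rest
    else elimLoop (cand ++ [g]) dupes rest

def find_odd_man_out_alt (test_case : Int) (guests : List Int) : Option String :=
  match elimLoop [] PySem.Set.empty guests with
  | [] => none
  | g :: _ => some (fmtCase test_case g)   -- 'if candidates: return f"…{candidates[0]}"'

-- ===== PRECONDITION & SPEC =====
def Spec_find_odd_man_out (test_case : Int) (guests : List Int) (out : Option String) : Prop := out = find_odd_man_out_alt test_case guests
instance (test_case : Int) (guests : List Int) (out : Option String) : Decidable (Spec_find_odd_man_out test_case guests out) := by unfold Spec_find_odd_man_out; infer_instance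

-- ===== CLAIM (what is proved, stated in full; the proofs are below) =====
def Claim_equal_find_odd_man_out : Prop := ∀ (test_case : Int) (guests : List Int), Dom_find_odd_man_out test_case guests → Spec_find_odd_man_out test_case guests (find_odd_man_out test_case guests)

-- ===== LEMMAS AND PROOFS =====

theorem stepA_eq :
    (fun (d : PySem.Dict Int Int) guest =>
      if d.contains guest then d.insert guest (d.getD guest 0 + 1)
      else d.insert guest 1)
    = (fun (d : PySem.Dict Int Int) x => d.insert x (d.getD x 0 + 1)) := by
  funext d g
  by_cases h : d.contains g
  · simp [h]
  · have hg : d.getD g 0 = 0 := by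
      simp only [PySem.Dict.getD, PySem.Dict.get?]
      have hnone : d.items.find? (fun p => p.1 == g) = none := by
        rw [List.find?_eq_none]
        intro p hp hb
        exact h (List.any_eq_true.mpr ⟨p, hp, hb⟩)
      simp [hnone]
    simp [h, hg]

theorem findOddScan_eq (test_case : Int) (l : List (Int × Int)) :
    findOddScan test_case l
      = (l.find? (fun gc => gc.2 == 1)).map (fun gc => fmtCase test_case gc.1) := by
  induction l with
  | nil => rfl
  | cons gc rest ih =>
    obtain ⟨g, c⟩ := gc
    by_cases h : c = 1 <;> simp [findOddScan, h, ih]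

-- the candidate-elimination invariant: surviving candidates are the old ones that never
-- reappear, followed by the fresh guests (first occurrences) seen exactly once in the rest
theorem elimLoop_spec (t : List Int) :
    ∀ (cand : List Int) (dupes : PySem.Set Int), cand.Nodup → (∀ x ∈ cand, x ∉ dupes) →
    elimLoop cand dupes t
      = cand.filter (fun x => t.count x == 0)
        ++ (PySem.Set.ofList t).filter
            (fun x => !(decide (x ∈ cand)) && (!(decide (x ∈ dupes)) && (t.count x == 1))) := by
  induction t with
  | nil =>
    intro cand dupes _ _
    simp [elimLoop, PySem.Set.ofList]
  | cons g rest ih =>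
    intro cand dupes hnd hdis
    rw [PySem.Set.ofList_cons]
    by_cases hdg : g ∈ dupes
    · -- skipped: g already a known duplicate
      rw [show elimLoop cand dupes (g :: rest) = elimLoop cand dupes rest by
            simp [elimLoop, hdg], ih cand dupes hnd hdis]
      congr 1
      · apply List.filter_congr
        intro x hx
        have hgx : ¬ g = x := fun h => hdis x hx (h ▸ hdg)
        simp [hgx]
      · rw [List.filter_cons]
        have hqg : (!(decide (g ∈ cand)) && (!(decide (g ∈ dupes)) && ((g :: rest).count g == 1))) = false := by
          simp [hdg]
        rw [hqg]
        simp only [PySem.Set.discard, List.filter_filter]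
        apply List.filter_congr
        intro x _
        by_cases hxg : x = g
        · subst hxg; simp [hdg]
        · have hgx : ¬ g = x := fun h => hxg h.symm
          simp [hgx, hxg]
    · by_cases hcg : g ∈ cand
      · -- second sight: remove from candidates, ban in dupes
        have hrm : (PySem.List.remove? cand g).getD cand = cand.erase g := by
          rw [PySem.List.remove?_eq_some_erase cand g hcg]; rfl
        have hadd : PySem.Set.add dupes g = dupes ++ [g] := PySem.Set.add_of_not_mem hdg
        have hdis' : ∀ x ∈ cand.erase g, x ∉ dupes ++ [g] := by
          intro x hx
          have hxg : x ≠ g := (List.Nodup.mem_erase_iff hnd |>.mp hx).1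
          have hxc : x ∈ cand := (List.Nodup.mem_erase_iff hnd |>.mp hx).2
          simp [hxg, hdis x hxc]
        rw [show elimLoop cand dupes (g :: rest)
              = elimLoop ((PySem.List.remove? cand g).getD cand) (PySem.Set.add dupes g) rest by
            simp [elimLoop, hdg, hcg], hrm, hadd,
          ih (cand.erase g) (dupes ++ [g]) (hnd.erase g) hdis']
        congr 1
        · rw [List.Nodup.erase_eq_filter hnd, List.filter_filter]
          apply List.filter_congr
          intro x _
          by_cases hxg : x = g
          · subst hxg; simp
          · have hgx : ¬ g = x := fun h => hxg h.symm
            simp [hgx, hxg]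
        · rw [List.filter_cons]
          have hqg : (!(decide (g ∈ cand)) && (!(decide (g ∈ dupes)) && ((g :: rest).count g == 1))) = false := by
            simp [hcg]
          rw [hqg]
          simp only [PySem.Set.discard, List.filter_filter]
          apply List.filter_congr
          intro x _
          by_cases hxg : x = g
          · subst hxg; simp
          · have hgx : ¬ g = x := fun h => hxg h.symm
            have hme : (x ∈ cand.erase g) ↔ (x ∈ cand) := List.mem_erase_of_ne hxg
            simp [hme, hgx, hxg]
      · -- first sight: append to candidates
        have hnd' : (cand ++ [g]).Nodup := by
          refine List.Nodup.append hnd (List.nodup_singleton g) ?_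
          intro a ha hb
          simp at hb; subst hb; exact hcg ha
        have hdis' : ∀ x ∈ cand ++ [g], x ∉ dupes := by
          intro x hx
          rcases List.mem_append.mp hx with h | h
          · exact hdis x h
          · simp at h; subst h; exact hdg
        rw [show elimLoop cand dupes (g :: rest) = elimLoop (cand ++ [g]) dupes rest by
            simp [elimLoop, hdg, hcg],
          ih (cand ++ [g]) dupes hnd' hdis']
        have hpc : List.filter (fun x => rest.count x == 0) cand
            = List.filter (fun x => (g :: rest).count x == 0) cand := by
          apply List.filter_congr
          intro x hx
          have hgx : ¬ g = x := fun h => hcg (h ▸ hx)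
          simp [hgx]
        have hq2 : List.filter
              (fun x => !(decide (x ∈ cand)) && (!(decide (x ∈ dupes)) && ((g :: rest).count x == 1)))
              ((PySem.Set.ofList rest).discard g)
            = List.filter
              (fun x => !(decide (x ∈ cand ++ [g])) && (!(decide (x ∈ dupes)) && (rest.count x == 1)))
              (PySem.Set.ofList rest) := by
          simp only [PySem.Set.discard, List.filter_filter]
          apply List.filter_congr
          intro x _
          by_cases hxg : x = g
          · subst hxg; simp
          · have hgx : ¬ g = x := fun h => hxg h.symm
            simp [hgx, hxg]
        have hqg : (!(decide (g ∈ cand)) && (!(decide (g ∈ dupes)) && ((g :: rest).count g == 1)))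
            = (rest.count g == 0) := by
          simp only [List.count_cons]
          cases h0 : rest.count g <;> simp [hcg, hdg]
        rw [List.filter_append, hpc, List.append_assoc]
        congr 1
        rw [← hq2]
        conv_rhs => rw [List.filter_cons]
        rw [hqg]
        cases h0 : (rest.count g == 0) <;> simp [h0]

theorem natCast_pred_eq (guests : List Int) :
    (fun gc : Int × Int => gc.2 == 1) ∘ (fun k => (k, (guests.count k : Int)))
      = fun g => guests.count g == 1 := by
  funext g
  simp [Function.comp]

-- ===== VERDICT (by name: the statement is the Claim_ definition above) =====
theorem find_odd_man_out_spec : Claim_equal_find_odd_man_out := by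
  intro test_case guests _
  unfold Spec_find_odd_man_out
  show findOddScan test_case
      (guests.foldl
        (fun d guest =>
          if d.contains guest then d.insert guest (d.getD guest 0 + 1)
          else d.insert guest 1)
        (PySem.Dict.empty : PySem.Dict Int Int)).items
    = find_odd_man_out_alt test_case guests
  rw [stepA_eq, PySem.Dict.foldl_insert_getD_add_one_eq_counter, PySem.Dict.items_counter,
    findOddScan_eq, List.find?_map, natCast_pred_eq]
  unfold find_odd_man_out_alt
  rw [elimLoop_spec guests [] PySem.Set.empty List.nodup_nil (by intro x hx; cases hx)]
  simp only [List.filter_nil, List.nil_append, PySem.Set.empty]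

  rw [← List.head?_filter]
  cases h : (PySem.Set.ofList guests).filter (fun x => guests.count x == 1) with
  | nil => simp [h]
  | cons a l => simp [h]
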